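-- pv_equiv track=rewrite | github.com/carloscfgos1980/python-for-exercise | main.py | most_vowels
-- ===== SOURCE A (Python) =====
-- def most_vowels(items):
--     def myFunc(e):
--         return len(e)
--     my_list = []
--     for item in items:
--         if 'a' in item and 'e' in item and 'i' in item and 'o' in item and 'u' in item:
--             my_list.append(item)
--             my_list.sort(reverse=True | False, key=myFunc)
--             my_list
--     return my_list[:3]
-- ===== SOURCE B (Python) =====
-- import heapq
--
-- def most_vowels(items):
--     filtered = [item for item in items if all(v in item for v in "aeiou")]
--     return heapq.nlargest(3, filtered, key=len)
-- ===== Notes on version B (the rewrite author's own statement) =====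
-- stated objective: idiomatic
-- what changed: A re-sorts the accumulator after every append inside the loop; B filters once with all() over the vowels and picks the three longest with heapq.nlargest(3, key=len), which keeps a bounded heap instead of repeatedly sorting.
import Mathlib
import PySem

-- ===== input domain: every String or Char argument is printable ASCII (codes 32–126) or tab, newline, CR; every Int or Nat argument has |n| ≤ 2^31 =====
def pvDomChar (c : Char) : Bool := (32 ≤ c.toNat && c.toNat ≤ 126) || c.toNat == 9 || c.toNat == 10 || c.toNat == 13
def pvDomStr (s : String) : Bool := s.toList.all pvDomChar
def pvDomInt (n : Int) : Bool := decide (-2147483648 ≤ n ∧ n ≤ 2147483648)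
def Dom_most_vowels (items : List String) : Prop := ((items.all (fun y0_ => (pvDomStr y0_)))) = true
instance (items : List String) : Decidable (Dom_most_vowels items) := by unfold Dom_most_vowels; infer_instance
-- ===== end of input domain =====

-- B filters once and takes the three longest (heapq.nlargest, = stable sort desc by len, take 3)
-- instead of A's re-sort of the accumulator after every append; return value only, no mutation issues.

-- ===== PORT A =====
-- key function myFunc(e) = len(e)
def pvMyFunc (e : String) : Int := PySem.Str.len e

-- the loop: append the matching item, then my_list.sort(reverse=True, key=myFunc)
def most_vowels (items : List String) : List String :=
  let my_list := items.foldl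
    (fun acc item =>
      if PySem.Str.isIn "a" item && PySem.Str.isIn "e" item && PySem.Str.isIn "i" item
         && PySem.Str.isIn "o" item && PySem.Str.isIn "u" item then
        PySem.List.sorted (acc ++ [item]) pvMyFunc true
      else acc) []
  PySem.List.slice my_list none (some 3)

-- ===== PORT B =====
-- all(v in item for v in "aeiou")
def pvHasAllVowels (item : String) : Bool :=
  "aeiou".toList.all (fun v => PySem.Str.isIn (String.ofList [v]) item)

-- heapq.nlargest(3, filtered, key=len) ported by its contract: sorted desc by key (stable), first 3
def most_vowels_alt (items : List String) : List String :=
  let filtered := items.filter pvHasAllVowels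
  (PySem.List.sorted filtered (fun s => PySem.Str.len s) true).take 3

-- ===== PRECONDITION & SPEC =====
def Spec_most_vowels (items : List String) (out : List String) : Prop := out = most_vowels_alt items
instance (items : List String) (out : List String) : Decidable (Spec_most_vowels items out) := by unfold Spec_most_vowels; infer_instance

-- ===== CLAIM (what is proved, stated in full; the proofs are below) =====
def Claim_equal_most_vowels : Prop := ∀ (items : List String), Dom_most_vowels items → Spec_most_vowels items (most_vowels items)

-- ===== LEMMAS AND PROOFS =====

-- A's per-item condition is B's vowel test
theorem pv_cond_eq (item : String) :
    (PySem.Str.isIn "a" item && PySem.Str.isIn "e" item && PySem.Str.isIn "i" item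
       && PySem.Str.isIn "o" item && PySem.Str.isIn "u" item) = pvHasAllVowels item := by
  simp [pvHasAllVowels, List.all, String.toList_ofList, Bool.and_assoc]

-- sorting after appending one element to an already-sorted list = sorting the whole appended list
-- stable descending sort of q ++ [x] = insert x into the sorted q
theorem pv_sorted_snoc (q : List String) (x : String) :
    PySem.List.sorted (q ++ [x]) pvMyFunc true
      = PySem.List.insertBy (fun a b => decide (pvMyFunc b < pvMyFunc a)) x
          (PySem.List.sorted q pvMyFunc true) := by
  rw [PySem.List.sorted_rev_eq_foldl_insertBy, List.foldl_append,
      ← PySem.List.sorted_rev_eq_foldl_insertBy]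
  rfl

-- sorting after appending one element to an already-sorted list = sorting the whole appended list
theorem pv_sorted_resort (l : List String) (x : String) :
    PySem.List.sorted (PySem.List.sorted l pvMyFunc true ++ [x]) pvMyFunc true
      = PySem.List.sorted (l ++ [x]) pvMyFunc true := by
  rw [pv_sorted_snoc, pv_sorted_snoc, PySem.List.sorted_rev_sorted_rev]

-- A's loop computes the one-shot stable descending sort of the filtered list
theorem pv_loop_eq (items : List String) :
    items.foldl
      (fun acc item =>
        if PySem.Str.isIn "a" item && PySem.Str.isIn "e" item && PySem.Str.isIn "i" item
           && PySem.Str.isIn "o" item && PySem.Str.isIn "u" item then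
          PySem.List.sorted (acc ++ [item]) pvMyFunc true
        else acc) []
      = PySem.List.sorted (items.filter pvHasAllVowels) pvMyFunc true := by
  induction items using List.reverseRecOn with
  | nil => rfl
  | append_singleton l x ih =>
      rw [List.foldl_append, List.foldl_cons, List.foldl_nil, ih, List.filter_append]
      rw [pv_cond_eq]
      by_cases h : pvHasAllVowels x
      · simp [h, pv_sorted_resort]
      · simp [h]

-- ===== VERDICT (by name: the statement is the Claim_ definition above) =====
theorem most_vowels_spec : Claim_equal_most_vowels := by
  intro items _
  show most_vowels items = most_vowels_alt items
  unfold most_vowels most_vowels_alt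
  rw [pv_loop_eq]
  rw [show ((3 : Int)) = ((3 : Nat) : Int) by norm_num, PySem.List.slice_to_natCast]
  rfl
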